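-- pv_equiv track=rewrite | github.com/nganhkhoa/ctf-writeup | 2020/flare-on/6_-_codeit/codeit_script.py | replace_function_name
-- ===== SOURCE A (Python) =====
-- def replace_function_name(line):
--     functions = {
--         "areoxaohpta": "CreatePicture",
--         "arewuoknzvh": "RandomName",
--         "aregfmwbsqd": "InstallResourceFile",
--         "areuznaqfmn": "GetComputerNameA",
--         "aregtfdcyni": "EncodeString",
--         "areyzotafnf": "Decrypt",
--         "areaqwbmtiz": "MD5",
--         "arepfnkwypw": "Windows8",
--         "areialbhuyt": "Main",
--         "arepqqkaeto": "WritePictureHeader",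
--         "arelassehha": "WritePicture",
--         "arerujpvsfp": "CreateFileRead",
--         "aremyfdtfqp": "CreateFileWrite",
--         "aremfkxlayv": "WriteFile",
--         "aremlfozynu": "ReadFile",
--         "arevtgkxjhu": "CloseHandle",
--         "arebbytwcoj": "DeleteFileA",
--         "arenwrbskll": "GetFileSize",
--         "areihnvapwn": "InitStrings",
--         "arehdidxrgk": "HexDecode"
--     }
--     for ori, new in functions.items():
--         line = line.replace(ori, new)
--     return line
-- ===== SOURCE B (Python) =====
-- def replace_function_name(line):
--     # all obfuscated names are "are" + an 8-char suffix; scan once, dispatching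
--     # on the "are" marker and looking up the 8-char suffix in a dict
--     suffixes = {
--         "oxaohpta": "CreatePicture", "wuoknzvh": "RandomName",
--         "gfmwbsqd": "InstallResourceFile", "uznaqfmn": "GetComputerNameA",
--         "gtfdcyni": "EncodeString", "yzotafnf": "Decrypt",
--         "aqwbmtiz": "MD5", "pfnkwypw": "Windows8",
--         "ialbhuyt": "Main", "pqqkaeto": "WritePictureHeader",
--         "lassehha": "WritePicture", "rujpvsfp": "CreateFileRead",
--         "myfdtfqp": "CreateFileWrite", "mfkxlayv": "WriteFile",
--         "mlfozynu": "ReadFile", "vtgkxjhu": "CloseHandle",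
--         "bbytwcoj": "DeleteFileA", "nwrbskll": "GetFileSize",
--         "ihnvapwn": "InitStrings", "hdidxrgk": "HexDecode",
--     }
--     out = []
--     i = 0
--     n = len(line)
--     while i < n:
--         if line.startswith("are", i) and line[i + 3:i + 11] in suffixes:
--             out.append(suffixes[line[i + 3:i + 11]])
--             i += 11
--         else:
--             out.append(line[i])
--             i += 1
--     return "".join(out)
-- ===== Notes on version B (the rewrite author's own statement) =====
-- stated objective: alternative
-- what changed: Instead of 20 sequential whole-string str.replace passes, B makes a single left-to-right scan that dispatches on the 3-character marker common to all obfuscated names and looks the following 8-character suffix up in a dict, emitting the readable name (or the literal character) and joining the pieces at the end.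
import Mathlib
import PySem

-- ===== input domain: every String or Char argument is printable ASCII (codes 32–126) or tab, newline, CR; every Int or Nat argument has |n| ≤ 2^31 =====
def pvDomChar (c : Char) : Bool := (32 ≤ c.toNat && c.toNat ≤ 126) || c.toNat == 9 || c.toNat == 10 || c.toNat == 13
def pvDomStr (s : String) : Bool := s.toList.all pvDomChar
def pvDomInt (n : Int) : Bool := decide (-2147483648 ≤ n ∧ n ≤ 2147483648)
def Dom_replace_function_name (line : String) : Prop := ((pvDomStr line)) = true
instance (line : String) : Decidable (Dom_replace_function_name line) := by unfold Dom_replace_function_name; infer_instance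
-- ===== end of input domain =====

-- B replaces A's 20 sequential whole-string str.replace passes by a single left-to-right scan that
-- dispatches on the 3-char marker common to all obfuscated names, then a suffix-table lookup (alternative decomposition).


-- ===== PORT A =====
-- A's dict ported as an association list in insertion order; the items() loop is a foldl of str.replace.
def functionsA : List (String × String) :=
  [("areoxaohpta", "CreatePicture"), ("arewuoknzvh", "RandomName"),
   ("aregfmwbsqd", "InstallResourceFile"), ("areuznaqfmn", "GetComputerNameA"),
   ("aregtfdcyni", "EncodeString"), ("areyzotafnf", "Decrypt"),
   ("areaqwbmtiz", "MD5"), ("arepfnkwypw", "Windows8"),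
   ("areialbhuyt", "Main"), ("arepqqkaeto", "WritePictureHeader"),
   ("arelassehha", "WritePicture"), ("arerujpvsfp", "CreateFileRead"),
   ("aremyfdtfqp", "CreateFileWrite"), ("aremfkxlayv", "WriteFile"),
   ("aremlfozynu", "ReadFile"), ("arevtgkxjhu", "CloseHandle"),
   ("arebbytwcoj", "DeleteFileA"), ("arenwrbskll", "GetFileSize"),
   ("areihnvapwn", "InitStrings"), ("arehdidxrgk", "HexDecode")]

def replace_function_name (line : String) : String :=
  functionsA.foldl (fun l p => PySem.Str.replace l p.1 p.2) line

-- ===== PORT B =====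
-- B's dict of 8-char suffixes, an association list in insertion order.
def suffixesB : List (String × String) :=
  [("oxaohpta", "CreatePicture"), ("wuoknzvh", "RandomName"),
   ("gfmwbsqd", "InstallResourceFile"), ("uznaqfmn", "GetComputerNameA"),
   ("gtfdcyni", "EncodeString"), ("yzotafnf", "Decrypt"),
   ("aqwbmtiz", "MD5"), ("pfnkwypw", "Windows8"),
   ("ialbhuyt", "Main"), ("pqqkaeto", "WritePictureHeader"),
   ("lassehha", "WritePicture"), ("rujpvsfp", "CreateFileRead"),
   ("myfdtfqp", "CreateFileWrite"), ("mfkxlayv", "WriteFile"),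
   ("mlfozynu", "ReadFile"), ("vtgkxjhu", "CloseHandle"),
   ("bbytwcoj", "DeleteFileA"), ("nwrbskll", "GetFileSize"),
   ("ihnvapwn", "InitStrings"), ("hdidxrgk", "HexDecode")]

def sufPairs : List (List Char × List Char) :=
  suffixesB.map (fun q => (q.1.toList, q.2.toList))

-- B's while-loop over the characters: the startswith marker test becomes take 3, the slice
-- line[i+3:i+11] becomes (drop 3).take 8, the dict membership/lookup a find? on the assoc list.
def scanB : List Char → List Char
  | [] => []
  | c :: t =>
    if (c :: t).take 3 = ['a', 'r', 'e'] then
      match sufPairs.find? (fun q => ((c :: t).drop 3).take 8 == q.1) with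
      | some q => q.2 ++ scanB ((c :: t).drop 11)
      | none => c :: scanB t
    else c :: scanB t
termination_by s => s.length
decreasing_by
  · simp [List.length_drop]
  · simp
  · simp

def replace_function_name_alt (line : String) : String :=
  String.ofList (scanB line.toList)

-- ===== PRECONDITION & SPEC =====
def pvKeys : List String :=
  ["areoxaohpta", "arewuoknzvh", "aregfmwbsqd", "areuznaqfmn", "aregtfdcyni",
   "areyzotafnf", "areaqwbmtiz", "arepfnkwypw", "areialbhuyt", "arepqqkaeto",
   "arelassehha", "arerujpvsfp", "aremyfdtfqp", "aremfkxlayv", "aremlfozynu",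
   "arevtgkxjhu", "arebbytwcoj", "arenwrbskll", "areihnvapwn", "arehdidxrgk"]

-- Pre_ excludes lines in which two occurrences of obfuscated names overlap (all names are 11 chars
-- long): on such lines A's dict-order sequential replace and B's leftmost single scan make different
-- but equally defensible choices of which overlapping occurrence to rewrite.
def Pre_replace_function_name (line : String) : Prop :=
  ∀ i, i < line.toList.length → ∀ d, d < 10 →
    ¬((∃ k ∈ pvKeys, k.toList <+: line.toList.drop i) ∧
      (∃ k ∈ pvKeys, k.toList <+: line.toList.drop (i + d + 1)))

instance (line : String) : Decidable (Pre_replace_function_name line) := by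
  unfold Pre_replace_function_name; infer_instance

def pvWitness_replace_function_name : String := "x = areoxaohpta(f)"

def Spec_replace_function_name (line : String) (out : String) : Prop := out = replace_function_name_alt line
instance (line : String) (out : String) : Decidable (Spec_replace_function_name line out) := by unfold Spec_replace_function_name; infer_instance

-- ===== CLAIM (what is proved, stated in full; the proofs are below) =====
def Claim_equal_replace_function_name : Prop := ∀ (line : String), Dom_replace_function_name line → Pre_replace_function_name line → Spec_replace_function_name line (replace_function_name line)

-- ===== LEMMAS AND PROOFS =====

-- proof-only intermediate form: a generic one-pass scan over an explicit (key, value) table,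
-- used to connect A's fold of replaces with B's suffix-dispatch scan
def pairsB : List (List Char × List Char) :=
  functionsA.map (fun p => (p.1.toList, p.2.toList))

def scanGo (ps : List (List Char × List Char)) : List Char → List Char
  | [] => []
  | c :: t =>
    match ps.find? (fun p => p.1.isPrefixOf (c :: t)) with
    | some p => p.2 ++ scanGo ps (t.drop (p.1.length - 1))
    | none => c :: scanGo ps t
termination_by s => s.length
decreasing_by
  · simp [List.length_drop]
  · simp

-- an occurrence of one of the 20 obfuscated names at position i of s
def MatchAt (s : List Char) (i : Nat) : Prop := ∃ k ∈ pvKeys, k.toList <+: s.drop i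

-- no two overlapping occurrences anywhere in s (all names are 11 characters long)
def NoOv (s : List Char) : Prop :=
  ∀ i j : Nat, i < j → j < i + 11 → ¬(MatchAt s i ∧ MatchAt s j)

-- decided facts about the concrete tables
lemma keysLen : ∀ p ∈ pairsB, p.1.length = 11 := by decide
lemma keyOf : ∀ p ∈ pairsB, p.1 ∈ pvKeys.map String.toList := by decide
lemma pvKeys_ne : ∀ k ∈ pvKeys, k.toList ≠ [] := by decide
lemma keysAre : ∀ p ∈ pairsB, p.1.take 3 = ['a', 'r', 'e'] := by decide
lemma keysInj : ∀ p ∈ pairsB, ∀ q ∈ pairsB, p.1 = q.1 → p = q := by decide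
lemma sufPairs_eq : sufPairs = pairsB.map (fun p => (p.1.drop 3, p.2)) := by decide
-- no key can begin or end strictly inside an inserted replacement value
lemma hVal : ∀ p ∈ pairsB, ∀ q ∈ pairsB, ∀ u ∈ q.2.tails, u ≠ [] → ¬ u <+: p.1 ∧ ¬ p.1 <+: u := by decide
-- no suffix of a key is prefix-comparable with a replacement value
lemma hKeySuf : ∀ p ∈ pairsB, ∀ q ∈ pairsB, ∀ u ∈ p.1.tails, u ≠ [] → ¬ u <+: q.2 ∧ ¬ q.2 <+: u := by decide

lemma matchAt_pairs {s : List Char} {i : Nat} {p : List Char × List Char}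
    (hp : p ∈ pairsB) (h : p.1 <+: s.drop i) : MatchAt s i := by
  rcases List.mem_map.mp (keyOf p hp) with ⟨k, hk, hke⟩
  exact ⟨k, hk, hke ▸ h⟩

lemma matchAt_lt {s : List Char} {i : Nat} (h : MatchAt s i) : i < s.length := by
  rcases h with ⟨k, hk, hpre⟩
  by_contra hge
  have : s.drop i = [] := List.drop_eq_nil_iff.mpr (by omega)
  rw [this, List.prefix_nil] at hpre
  exact pvKeys_ne k hk hpre

lemma noOv_drop {s : List Char} (h : NoOv s) (m : Nat) : NoOv (s.drop m) := by
  intro i j hij hj ⟨⟨p, hp, hpre⟩, ⟨q, hq, hqre⟩⟩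
  rw [List.drop_drop] at hpre hqre
  exact h (m + i) (m + j) (by omega) (by omega) ⟨⟨p, hp, hpre⟩, ⟨q, hq, hqre⟩⟩

lemma pre_noOv {line : String} (h : Pre_replace_function_name line) : NoOv line.toList := by
  intro i j hij hj ⟨h1, h2⟩
  have hi : i < line.toList.length := matchAt_lt h1
  have := h i hi (j - i - 1) (by omega)
  rw [show i + (j - i - 1) + 1 = j by omega] at this
  exact this ⟨h1, h2⟩

lemma prefix_append_cases {w a b : List Char} (h : w <+: a ++ b) : w <+: a ∨ a <+: w := by
  rcases Nat.le_total w.length a.length with hle | hle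
  · exact Or.inl (List.prefix_of_prefix_length_le h (List.prefix_append a b) hle)
  · exact Or.inr (List.prefix_of_prefix_length_le (List.prefix_append a b) h hle)

lemma scanGo_cons_some {ps : List (List Char × List Char)} {c : Char} {t : List Char}
    {p : List Char × List Char} (h : ps.find? (fun p => p.1.isPrefixOf (c :: t)) = some p) :
    scanGo ps (c :: t) = p.2 ++ scanGo ps (t.drop (p.1.length - 1)) := by
  rw [scanGo, h]

lemma scanGo_cons_none {ps : List (List Char × List Char)} {c : Char} {t : List Char}
    (h : ps.find? (fun p => p.1.isPrefixOf (c :: t)) = none) :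
    scanGo ps (c :: t) = c :: scanGo ps t := by
  rw [scanGo, h]

-- PySem.Chars.replace with one nonempty pattern is the one-pair scan
lemma go_eq (old new : List Char) (h : old ≠ []) :
    ∀ fuel s acc, s.length ≤ fuel →
      PySem.Chars.replace.go old new fuel s acc = acc.reverse ++ scanGo [(old, new)] s := by
  intro fuel
  induction fuel with
  | zero =>
    intro s acc hlen
    have : s = [] := List.eq_nil_of_length_eq_zero (by omega)
    subst this
    simp [PySem.Chars.replace.go, scanGo]
  | succ n ih =>
    intro s acc hlen
    cases s with
    | nil => simp [PySem.Chars.replace.go, scanGo]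
    | cons c t =>
      by_cases hp : old.isPrefixOf (c :: t)
      · obtain ⟨m, hm⟩ : ∃ m, old.length = m + 1 := by
          cases old with
          | nil => exact absurd rfl h
          | cons a l => exact ⟨l.length, by simp⟩
        have h1 : PySem.Chars.replace.go old new (n + 1) (c :: t) acc
            = PySem.Chars.replace.go old new n ((c :: t).drop old.length) (new.reverse ++ acc) := by
          rw [PySem.Chars.replace.go]; simp [hp]
        have h2 : (c :: t).drop old.length = t.drop (old.length - 1) := by
          rw [hm]; simp [List.drop_succ_cons]
        have h3 := ih ((c :: t).drop old.length) (new.reverse ++ acc)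
          (by rw [List.length_drop, hm]; simp at hlen ⊢; omega)
        have h4 : ([((old : List Char), (new : List Char))] : List (List Char × List Char)).find?
            (fun p => p.1.isPrefixOf (c :: t)) = some (old, new) := by
          simp [List.find?, hp]
        rw [h1, h3, scanGo_cons_some h4, h2]
        simp
      · have h1 : PySem.Chars.replace.go old new (n + 1) (c :: t) acc
            = PySem.Chars.replace.go old new n t (c :: acc) := by
          rw [PySem.Chars.replace.go]; simp [hp]
        have h4 : ([((old : List Char), (new : List Char))] : List (List Char × List Char)).find?
            (fun p => p.1.isPrefixOf (c :: t)) = none := by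
          simp [List.find?, hp]
        rw [h1, ih t (c :: acc) (by simp at hlen; omega), scanGo_cons_none h4]
        simp

lemma replace_eq (s old new : List Char) (h : old ≠ []) :
    PySem.Chars.replace s old new = scanGo [(old, new)] s := by
  rw [PySem.Chars.replace]
  simp only [List.isEmpty_iff]
  rw [if_neg h]
  simpa using go_eq old new h s.length s [] le_rfl

-- scanning a string that starts with (a suffix of) a replacement value passes over it untouched
lemma scan_skip_value {k v : List Char} (hkv : (k, v) ∈ pairsB) {q : List Char × List Char}
    (hq : q ∈ pairsB) :
    ∀ w X, w <:+ q.2 → scanGo [(k, v)] (w ++ X) = w ++ scanGo [(k, v)] X := by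
  intro w
  induction w with
  | nil => intro X _; simp
  | cons d w' ihw =>
    intro X hsuf
    have hnm : ¬ k <+: (d :: w') ++ X := by
      intro hpre
      have hu := hVal (k, v) hkv q hq (d :: w') (List.mem_tails _ _ |>.mpr hsuf) (by simp)
      rcases prefix_append_cases hpre with h1 | h1
      · exact hu.2 h1
      · exact hu.1 h1
    have hf : ([((k : List Char), (v : List Char))] : List (List Char × List Char)).find?
        (fun p => p.1.isPrefixOf (d :: (w' ++ X))) = none := by
      simp only [List.find?]
      have : k.isPrefixOf (d :: (w' ++ X)) = false := by
        rw [← Bool.not_eq_true, List.isPrefixOf_iff_prefix]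
        simpa using hnm
      simp [this]
    calc scanGo [(k, v)] ((d :: w') ++ X) = d :: scanGo [(k, v)] (w' ++ X) :=
          scanGo_cons_none hf
      _ = d :: (w' ++ scanGo [(k, v)] X) := by
          rw [ihw X (List.IsSuffix.trans (List.suffix_cons d w') hsuf)]
      _ = (d :: w') ++ scanGo [(k, v)] X := rfl

-- a literal stretch in which no table key starts anywhere is passed over untouched
lemma scan_lit (ps : List (List Char × List Char)) :
    ∀ w r, (∀ j, j < w.length → ∀ p ∈ ps, ¬ p.1 <+: (w ++ r).drop j) →
      scanGo ps (w ++ r) = w ++ scanGo ps r := by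
  intro w
  induction w with
  | nil => intro r _; simp
  | cons c w' ihw =>
    intro r hno
    have hf : ps.find? (fun p => p.1.isPrefixOf (c :: (w' ++ r))) = none := by
      rw [List.find?_eq_none]
      intro p hp
      simp only [List.isPrefixOf_iff_prefix]
      simpa using hno 0 (by simp) p hp
    rw [show (c :: w') ++ r = c :: (w' ++ r) from rfl, scanGo_cons_none hf,
      ihw r (fun j hj p hp => by simpa using hno (j + 1) (by simpa using by omega) p hp)]
    rfl

-- no suffix of a key can appear at the front of a scan's output unless it was there in the input
lemma scan_no_new (ps : List (List Char × List Char)) (hps : ∀ p ∈ ps, p ∈ pairsB)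
    (k v : List Char) (hkv : (k, v) ∈ pairsB) :
    ∀ s w, w ≠ [] → w <:+ k → ¬ w <+: s → ¬ w <+: scanGo ps s := by
  intro s
  induction s with
  | nil => intro w hw _ _; simpa [scanGo, List.prefix_nil]
  | cons c t iht =>
    intro w hw hwk hws
    cases hf : ps.find? (fun p => p.1.isPrefixOf (c :: t)) with
    | some p =>
      rw [scanGo_cons_some hf]
      intro hpre
      have hp : p ∈ pairsB := hps p (List.mem_of_find?_eq_some hf)
      have hu := hKeySuf (k, v) hkv p hp w (List.mem_tails _ _ |>.mpr hwk) hw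
      rcases prefix_append_cases hpre with h1 | h1
      · exact hu.1 h1
      · exact hu.2 h1
    | none =>
      rw [scanGo_cons_none hf]
      intro hpre
      cases w with
      | nil => exact hw rfl
      | cons a w' =>
        rcases List.cons_prefix_cons.mp hpre with ⟨rfl, hw'⟩
        cases hw'e : w' with
        | nil => exact hws (by simp [hw'e, List.cons_prefix_cons])
        | cons b w'' =>
          have hw'k : w' <:+ k := List.IsSuffix.trans (List.suffix_cons a w') hwk
          have hw't : ¬ w' <+: t := fun hc => hws (List.cons_prefix_cons.mpr ⟨rfl, hc⟩)
          exact iht w' (by simp [hw'e]) hw'k hw't (hw'e ▸ hw')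

-- composing one more pair onto an already-scanned string = scanning with the longer table
lemma comp (ps : List (List Char × List Char)) (hps : ∀ p ∈ ps, p ∈ pairsB)
    (k v : List Char) (hkv : (k, v) ∈ pairsB) :
    ∀ n s, s.length ≤ n → NoOv s →
      scanGo [(k, v)] (scanGo ps s) = scanGo (ps ++ [(k, v)]) s := by
  intro n
  induction n with
  | zero =>
    intro s hlen _
    have : s = [] := List.eq_nil_of_length_eq_zero (by omega)
    subst this; simp [scanGo]
  | succ n ih =>
    intro s hlen hno
    cases s with
    | nil => simp [scanGo]
    | cons c t =>
      cases hf : ps.find? (fun p => p.1.isPrefixOf (c :: t)) with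
      | some p =>
        have hp : p ∈ pairsB := hps p (List.mem_of_find?_eq_some hf)
        have hfapp : (ps ++ [(k, v)]).find? (fun p => p.1.isPrefixOf (c :: t)) = some p := by
          rw [List.find?_append, hf]; rfl
        have h11 := keysLen p hp
        have hdrop : t.drop (p.1.length - 1) = (c :: t).drop p.1.length := by
          rw [h11]; simp [List.drop_succ_cons]
        rw [scanGo_cons_some hf, scanGo_cons_some hfapp,
          scan_skip_value hkv hp p.2 _ List.suffix_rfl,
          ih _ (by rw [List.length_drop]; simp at hlen; omega)
            (by rw [hdrop]; exact noOv_drop hno p.1.length)]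
      | none =>
        by_cases hk : k <+: c :: t
        · obtain ⟨r, hr⟩ := hk
          have hk11 : k.length = 11 := keysLen (k, v) hkv
          have hkne : k ≠ [] := by intro hc; rw [hc] at hk11; simp at hk11
          have hnoin : ∀ j, j < k.length → ∀ p ∈ ps, ¬ p.1 <+: (k ++ r).drop j := by
            intro j hj p hp hpre
            cases j with
            | zero =>
              rw [List.find?_eq_none] at hf
              have := hf p hp
              rw [Bool.not_eq_true, ← Bool.not_eq_true, List.isPrefixOf_iff_prefix] at this
              exact this (by simpa [hr] using hpre)
            | succ j' =>
              have hm0 : MatchAt (c :: t) 0 := matchAt_pairs hkv (by simp [← hr])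
              have hmj : MatchAt (c :: t) (j' + 1) := matchAt_pairs (hps p hp) (by rw [← hr]; exact hpre)
              exact hno 0 (j' + 1) (by omega) (by omega) ⟨hm0, hmj⟩
          have hlit : scanGo ps (k ++ r) = k ++ scanGo ps r := scan_lit ps k r hnoin
          obtain ⟨c', k', hck⟩ : ∃ c' k', k = c' :: k' := by
            cases k with
            | nil => exact absurd rfl hkne
            | cons a l => exact ⟨a, l, rfl⟩
          have hck2 : k' ++ r = t := by
            have h' := hr; rw [hck] at h'; exact (List.cons.injEq _ _ _ _ ▸ h').2
          have hrlen : r.length ≤ n := by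
            have hlen2 : k.length + r.length = t.length + 1 := by
              rw [← List.length_append, hr]; simp
            simp at hlen; omega
          have hnor : NoOv r := by
            have h' : r = (c :: t).drop k.length := by rw [← hr, List.drop_left]
            rw [h']; exact noOv_drop hno k.length
          have hL : scanGo ps (c :: t) = k ++ scanGo ps r := by rw [← hr, hlit]
          have hfin : ([((k : List Char), (v : List Char))] : List (List Char × List Char)).find?
              (fun p => p.1.isPrefixOf (c' :: (k' ++ scanGo ps r))) = some (k, v) := by
            simp only [List.find?]
            have h' : k.isPrefixOf (c' :: (k' ++ scanGo ps r)) = true := by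
              rw [List.isPrefixOf_iff_prefix, hck]
              exact List.cons_prefix_cons.mpr ⟨rfl, List.prefix_append _ _⟩
            simp [h']
          have hfapp : (ps ++ [(k, v)]).find? (fun p => p.1.isPrefixOf (c :: t)) = some (k, v) := by
            rw [List.find?_append, hf]
            simp only [Option.none_or, List.find?]
            have h' : k.isPrefixOf (c :: t) = true := List.isPrefixOf_iff_prefix.mpr ⟨r, hr⟩
            simp [h']
          have hdrop1 : (k' ++ scanGo ps r).drop (k.length - 1) = scanGo ps r := by
            rw [hck]; simp
          have htr : t.drop (k.length - 1) = r := by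
            rw [hck, ← hck2]; simp
          calc scanGo [(k, v)] (scanGo ps (c :: t))
              = scanGo [(k, v)] (c' :: (k' ++ scanGo ps r)) := by rw [hL, hck]; rfl
            _ = v ++ scanGo [(k, v)] ((k' ++ scanGo ps r).drop (k.length - 1)) :=
                scanGo_cons_some hfin
            _ = v ++ scanGo [(k, v)] (scanGo ps r) := by rw [hdrop1]
            _ = v ++ scanGo (ps ++ [(k, v)]) r := by rw [ih r hrlen hnor]
            _ = scanGo (ps ++ [(k, v)]) (c :: t) := by rw [scanGo_cons_some hfapp, htr]
        · have hfapp : (ps ++ [(k, v)]).find? (fun p => p.1.isPrefixOf (c :: t)) = none := by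
            rw [List.find?_append, hf]
            simp only [Option.none_or, List.find?]
            have : k.isPrefixOf (c :: t) = false := by
              rw [← Bool.not_eq_true, List.isPrefixOf_iff_prefix]; exact hk
            simp [this]
          have hnn : ¬ k <+: scanGo ps (c :: t) :=
            scan_no_new ps hps k v hkv (c :: t) k
              (by intro hc; rw [hc] at hkv; exact by simpa using keysLen _ hkv) List.suffix_rfl hk
          rw [scanGo_cons_none hf] at hnn ⊢
          have hfs : ([((k : List Char), (v : List Char))] : List (List Char × List Char)).find?
              (fun p => p.1.isPrefixOf (c :: scanGo ps t)) = none := by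
            simp only [List.find?]
            have : k.isPrefixOf (c :: scanGo ps t) = false := by
              rw [← Bool.not_eq_true, List.isPrefixOf_iff_prefix]; exact hnn
            simp [this]
          rw [scanGo_cons_none hfs, scanGo_cons_none hfapp,
            ih t (by simp at hlen; omega) (by simpa using noOv_drop hno 1)]

lemma fold_chars (ps : List (String × String)) :
    ∀ s : String, (ps.foldl (fun l p => PySem.Str.replace l p.1 p.2) s).toList
      = (ps.map (fun p => (p.1.toList, p.2.toList))).foldl
          (fun l p => PySem.Chars.replace l p.1 p.2) s.toList := by
  induction ps with
  | nil => intro s; rfl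
  | cons p ps ihp =>
    intro s
    simp only [List.foldl_cons, List.map_cons]
    rw [ihp, PySem.Str.toList_replace]

lemma scanGo_nil_table : ∀ s : List Char, scanGo [] s = s := by
  intro s
  induction s with
  | nil => simp [scanGo]
  | cons c t iht => rw [scanGo_cons_none (by simp)] ; rw [iht]

lemma fold_take (s : List Char) (h : NoOv s) :
    ∀ n, n ≤ pairsB.length →
      (pairsB.take n).foldl (fun l p => PySem.Chars.replace l p.1 p.2) s
        = scanGo (pairsB.take n) s := by
  intro n
  induction n with
  | zero => intro _; simp [scanGo_nil_table]
  | succ n ihn =>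
    intro hn
    have hlt : n < pairsB.length := by omega
    have htake : pairsB.take (n + 1) = pairsB.take n ++ [pairsB[n]] := by
      rw [List.take_add_one]; simp [List.getElem?_eq_getElem hlt]
    have hm : pairsB[n] ∈ pairsB := List.getElem_mem hlt
    have hkne : (pairsB[n].1, pairsB[n].2) ∈ pairsB := by simp [hm]
    rw [htake, List.foldl_append, ihn (by omega)]
    simp only [List.foldl_cons, List.foldl_nil]
    rw [replace_eq _ _ _ (by intro hc; have := keysLen _ hm; rw [hc] at this; simp at this)]
    exact comp (pairsB.take n) (fun p hp => List.mem_of_mem_take hp) pairsB[n].1 pairsB[n].2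
      hkne s.length s le_rfl h

-- a generic "unique witness" find? lemma
lemma find?_eq_some_unique {α : Type} (l : List α) (pr : α → Bool) (p : α)
    (hp : p ∈ l) (hpp : pr p = true) (huniq : ∀ a ∈ l, pr a = true → a = p) :
    l.find? pr = some p := by
  induction l with
  | nil => cases hp
  | cons a l ihl =>
    by_cases ha : pr a = true
    · rw [show (a :: l).find? pr = some a by simp [ha],
        huniq a List.mem_cons_self ha]
    · rw [show (a :: l).find? pr = l.find? pr by simp [ha]]
      rcases List.mem_cons.mp hp with rfl | hp'
      · exact absurd hpp ha
      · exact ihl hp' (fun b hb => huniq b (List.mem_cons_of_mem a hb))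

-- a key prefixes s iff it equals the first 11 characters of s
lemma key_prefix_iff {p : List Char × List Char} (hp : p ∈ pairsB) (s : List Char) :
    p.1 <+: s ↔ p.1 = s.take 11 := by
  rw [List.prefix_iff_eq_take, keysLen p hp]

-- B's suffix-dispatch scan agrees with the one-pass scan over the full-key table
lemma scanB_eq : ∀ s, scanB s = scanGo pairsB s := by
  intro s
  induction hn : s.length using Nat.strong_induction_on generalizing s with
  | _ n ih =>
  subst hn
  cases s with
  | nil => rw [scanB, scanGo]
  | cons c t =>
    by_cases hare : (c :: t).take 3 = ['a', 'r', 'e']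
    · cases hfs : sufPairs.find? (fun q => ((c :: t).drop 3).take 8 == q.1) with
      | some q =>
        -- the suffix lookup hit: recover the full-key table entry
        have hq : q ∈ sufPairs := List.mem_of_find?_eq_some hfs
        have hqeq : ((c :: t).drop 3).take 8 = q.1 := by
          have := List.find?_some hfs
          exact eq_of_beq this
        rw [sufPairs_eq] at hq
        rcases List.mem_map.mp hq with ⟨p, hp, hpe⟩
        have hkey : p.1 = (c :: t).take 11 := by
          have h1 : p.1 = p.1.take 3 ++ p.1.drop 3 := (List.take_append_drop 3 p.1).symm
          have h2 : (c :: t).take 11 = (c :: t).take 3 ++ ((c :: t).drop 3).take 8 := by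
            rw [show (11 : Nat) = 3 + 8 from rfl]; exact List.take_add ..
          rw [h1, keysAre p hp, h2, hare, hqeq, ← hpe]
        have hpre : p.1 <+: c :: t := (key_prefix_iff hp _).mpr hkey
        have hfind : pairsB.find? (fun p => p.1.isPrefixOf (c :: t)) = some p := by
          apply find?_eq_some_unique _ _ _ hp (List.isPrefixOf_iff_prefix.mpr hpre)
          intro a ha hpa
          apply keysInj a ha p hp
          rw [(key_prefix_iff ha _).mp (List.isPrefixOf_iff_prefix.mp hpa), hkey]
        have hdrop : t.drop (p.1.length - 1) = (c :: t).drop 11 := by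
          rw [keysLen p hp]; rfl
        rw [scanB, if_pos hare, hfs, scanGo_cons_some hfind, hdrop, ← hpe]
        have hlen : ((c :: t).drop 11).length < (c :: t).length := by
          rw [List.length_drop]; simp
        rw [ih _ hlen _ rfl]
      | none =>
        -- no suffix matched: no full key is a prefix either
        have hfind : pairsB.find? (fun p => p.1.isPrefixOf (c :: t)) = none := by
          rw [List.find?_eq_none]
          intro p hp hc
          have hpre := List.isPrefixOf_iff_prefix.mp hc
          have hkey := (key_prefix_iff hp _).mp hpre
          have hqin : (p.1.drop 3, p.2) ∈ sufPairs := by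
            rw [sufPairs_eq]; exact List.mem_map.mpr ⟨p, hp, rfl⟩
          have hqeq : ((c :: t).drop 3).take 8 = p.1.drop 3 := by
            have h2 : (c :: t).take 11 = (c :: t).take 3 ++ ((c :: t).drop 3).take 8 := by
              rw [show (11 : Nat) = 3 + 8 from rfl]; exact List.take_add ..
            have h1 : p.1 = p.1.take 3 ++ p.1.drop 3 := (List.take_append_drop 3 p.1).symm
            have := hkey
            rw [h2, hare] at this
            rw [h1, keysAre p hp] at this
            exact (List.append_cancel_left this).symm
          rw [List.find?_eq_none] at hfs
          exact absurd (by simpa using hqeq) (by simpa using hfs _ hqin)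
        rw [scanB, if_pos hare, List.find?_eq_none.mpr (fun q hq => by
            rw [List.find?_eq_none] at hfs; exact hfs q hq),
          scanGo_cons_none hfind, ih t.length (by simp) t rfl]
    · -- no "are" marker: no full key is a prefix
      have hfind : pairsB.find? (fun p => p.1.isPrefixOf (c :: t)) = none := by
        rw [List.find?_eq_none]
        intro p hp hc
        have hkey := (key_prefix_iff hp _).mp (List.isPrefixOf_iff_prefix.mp hc)
        apply hare
        have h3 : (c :: t).take 3 = ((c :: t).take 11).take 3 := by
          rw [List.take_take]; norm_num
        rw [h3, ← hkey, keysAre p hp]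
      rw [scanB, if_neg hare, scanGo_cons_none hfind, ih t.length (by simp) t rfl]

-- ===== VERDICT (by name: the statement is the Claim_ definition above) =====
theorem replace_function_name_spec : Claim_equal_replace_function_name := by
  intro line _ hpre
  unfold Spec_replace_function_name replace_function_name replace_function_name_alt
  have h1 := fold_chars functionsA line
  have h2 := fold_take line.toList (pre_noOv hpre) pairsB.length le_rfl
  rw [List.take_length] at h2
  have h3 : (functionsA.foldl (fun l p => PySem.Str.replace l p.1 p.2) line).toList
      = scanGo pairsB line.toList := by rw [h1]; exact h2
  have h4 := congrArg String.ofList h3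
  rw [scanB_eq]
  simpa using h4
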